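-- pv_equiv track=rewrite | github.com/mars-s/pdfspy | app/hazard_classifier.py | determine_signal_word
-- ===== SOURCE A (Python) =====
-- from typing import Dict, List
--
-- def determine_signal_word(h_codes: List[str]) -> str:
--     """Determine signal word based on H-codes"""
--     danger_codes = [
--         'H200', 'H201', 'H202', 'H203', 'H204', 'H205',  # Explosives
--         'H220', 'H222', 'H224',  # Highly flammable
--         'H240', 'H241', 'H250', 'H260', 'H271',  # Reactive
--         'H280',  # Compressed gas
--         'H300', 'H301', 'H310', 'H311', 'H330', 'H331',  # Acute toxicity
--         'H314', 'H318',  # Corrosive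
--         'H334',  # Respiratory sensitizer
--         'H340', 'H350', 'H360', 'H370', 'H372',  # Chronic effects
--         'H400', 'H410'  # Environmental
--     ]
--
--     warning_codes = [
--         'H205', 'H221', 'H223', 'H225', 'H226', 'H227', 'H228',  # Flammable
--         'H241', 'H242', 'H251', 'H252', 'H261', 'H270', 'H272',  # Reactive
--         'H281', 'H290',  # Other physical
--         'H302', 'H303', 'H304', 'H305', 'H312', 'H313', 'H315', 'H316',  # Health
--         'H317', 'H319', 'H320', 'H332', 'H333', 'H335', 'H336',  # Health continued
--         'H341', 'H351', 'H361', 'H362', 'H371', 'H373',  # Chronic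
--         'H401', 'H402', 'H411', 'H412', 'H413', 'H420'  # Environmental
--     ]
--
--     # Check for DANGER codes first (highest priority)
--     for code in h_codes:
--         if code in danger_codes:
--             return 'DANGER'
--
--     # Check for WARNING codes
--     for code in h_codes:
--         if code in warning_codes:
--             return 'WARNING'
--
--     return 'None' if not h_codes else 'WARNING'  # Default to WARNING if codes exist
-- ===== SOURCE B (Python) =====
-- # B: single-pass max-severity fold: each code maps to a numeric level
-- # (2 = danger code, 1 = any other code), the list is reduced with max
-- # starting at 0, and the final level indexes a table of signal words.
-- DANGER_CODES = frozenset([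
--     'H200', 'H201', 'H202', 'H203', 'H204', 'H205',
--     'H220', 'H222', 'H224',
--     'H240', 'H241', 'H250', 'H260', 'H271',
--     'H280',
--     'H300', 'H301', 'H310', 'H311', 'H330', 'H331',
--     'H314', 'H318',
--     'H334',
--     'H340', 'H350', 'H360', 'H370', 'H372',
--     'H400', 'H410',
-- ])
--
-- SIGNAL_WORDS = ('None', 'WARNING', 'DANGER')
--
--
-- def _severity(code):
--     return 2 if code in DANGER_CODES else 1
--
--
-- def determine_signal_word(h_codes):
--     level = 0
--     for code in h_codes:
--         level = max(level, _severity(code))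
--     return SIGNAL_WORDS[level]
-- ===== Notes on version B (the rewrite author's own statement) =====
-- stated objective: alternative
-- what changed: Replaced A's two staged early-return membership scans over two code lists with a single-pass numeric reduction: each code is mapped to a severity level (2 for danger codes via a frozenset, 1 otherwise), the list is folded with max from 0, and the resulting level indexes a table of signal words; A's whole WARNING list disappears since danger-free nonempty input defaults to WARNING anyway.
import Mathlib
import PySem

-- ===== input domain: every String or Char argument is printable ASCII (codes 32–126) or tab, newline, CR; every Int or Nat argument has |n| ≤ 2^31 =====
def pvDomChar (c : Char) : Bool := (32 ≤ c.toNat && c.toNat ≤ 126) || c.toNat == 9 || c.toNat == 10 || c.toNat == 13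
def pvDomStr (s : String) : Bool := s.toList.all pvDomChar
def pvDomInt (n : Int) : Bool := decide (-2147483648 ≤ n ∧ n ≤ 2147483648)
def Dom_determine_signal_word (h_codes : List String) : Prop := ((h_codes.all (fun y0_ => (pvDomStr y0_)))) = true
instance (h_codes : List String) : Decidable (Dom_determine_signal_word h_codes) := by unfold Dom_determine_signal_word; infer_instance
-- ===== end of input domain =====

-- B replaces A's two staged early-return membership scans with one numeric
-- reduction: per-code severity level, max-fold, table lookup (objective: alternative).

-- ===== PORT A =====
def dswDangerCodes : List String :=
  ["H200", "H201", "H202", "H203", "H204", "H205",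
   "H220", "H222", "H224",
   "H240", "H241", "H250", "H260", "H271",
   "H280",
   "H300", "H301", "H310", "H311", "H330", "H331",
   "H314", "H318",
   "H334",
   "H340", "H350", "H360", "H370", "H372",
   "H400", "H410"]

def dswWarningCodes : List String :=
  ["H205", "H221", "H223", "H225", "H226", "H227", "H228",
   "H241", "H242", "H251", "H252", "H261", "H270", "H272",
   "H281", "H290",
   "H302", "H303", "H304", "H305", "H312", "H313", "H315", "H316",
   "H317", "H319", "H320", "H332", "H333", "H335", "H336",
   "H341", "H351", "H361", "H362", "H371", "H373",
   "H401", "H402", "H411", "H412", "H413", "H420"]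

-- first 'for' loop of A: return 'DANGER' on the first code found in danger_codes
def dswDangerLoop : List String → Option String
  | [] => none
  | c :: rest => if dswDangerCodes.contains c then some "DANGER" else dswDangerLoop rest

-- second 'for' loop of A: return 'WARNING' on the first code found in warning_codes
def dswWarningLoop : List String → Option String
  | [] => none
  | c :: rest => if dswWarningCodes.contains c then some "WARNING" else dswWarningLoop rest

def determine_signal_word (h_codes : List String) : String :=
  match dswDangerLoop h_codes with
  | some r => r
  | none =>
    match dswWarningLoop h_codes with
    | some r => r
    | none => if h_codes.isEmpty then "None" else "WARNING"

-- ===== PORT B =====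
def dswDangerSet : PySem.Set String := PySem.Set.ofList dswDangerCodes

def dswSignalWords : List String := ["None", "WARNING", "DANGER"]

-- B's _severity: 2 for a danger code, 1 for anything else
def dswSeverity (code : String) : Nat :=
  if PySem.Set.contains dswDangerSet code then 2 else 1

-- B's loop: level = max(level, _severity(code)) over the list, from 0
def determine_signal_word_alt (h_codes : List String) : String :=
  let level := h_codes.foldl (fun l c => max l (dswSeverity c)) 0
  dswSignalWords.getD level ""   -- SIGNAL_WORDS[level]; level is always 0..2

-- ===== PRECONDITION & SPEC =====
def Spec_determine_signal_word (h_codes : List String) (out : String) : Prop := out = determine_signal_word_alt h_codes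
instance (h_codes : List String) (out : String) : Decidable (Spec_determine_signal_word h_codes out) := by unfold Spec_determine_signal_word; infer_instance

-- ===== CLAIM (what is proved, stated in full; the proofs are below) =====
def Claim_equal_determine_signal_word : Prop := ∀ (h_codes : List String), Dom_determine_signal_word h_codes → Spec_determine_signal_word h_codes (determine_signal_word h_codes)

-- ===== LEMMAS AND PROOFS =====

-- A's first loop hits iff some element of h_codes is a danger code
lemma dswDangerLoop_eq (h : List String) :
    dswDangerLoop h = if h.any (fun c => dswDangerCodes.contains c) then some "DANGER" else none := by
  induction h with
  | nil => rfl
  | cons c rest ih =>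
    simp only [dswDangerLoop, List.any_cons, ih]
    by_cases hc : c ∈ dswDangerCodes <;> simp [hc]

-- A's second loop only ever returns "WARNING", and only on a nonempty list
lemma dswWarningLoop_some (h : List String) (r : String) (hr : dswWarningLoop h = some r) :
    r = "WARNING" ∧ h ≠ [] := by
  induction h with
  | nil => simp [dswWarningLoop] at hr
  | cons c rest ih =>
    refine ⟨?_, by simp⟩
    simp only [dswWarningLoop] at hr
    split at hr
    · exact (Option.some_inj.mp hr).symm
    · exact (ih hr).1

-- severity witnesses danger membership
lemma dswSeverity_eq (c : String) :
    dswSeverity c = if dswDangerCodes.contains c then 2 else 1 := by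
  simp [dswSeverity, PySem.Set.contains, dswDangerSet, PySem.Set.mem_ofList,
    List.contains_eq_mem]

-- B's fold computes the max severity of the list
lemma dswFold_eq (h : List String) :
    h.foldl (fun l c => max l (dswSeverity c)) 0 =
      if h.any (fun c => dswDangerCodes.contains c) then 2
      else if h.isEmpty then 0 else 1 := by
  induction h with
  | nil => rfl
  | cons c rest ih =>
    have hstep : ∀ (a : Nat) (t : List String),
        t.foldl (fun l c => max l (dswSeverity c)) a =
          max a (t.foldl (fun l c => max l (dswSeverity c)) 0) := by
      intro a t
      induction t generalizing a with
      | nil => simp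
      | cons d u ihu =>
        simp only [List.foldl_cons]
        rw [ihu (max a (dswSeverity d)), ihu (max 0 (dswSeverity d))]
        omega
    simp only [List.foldl_cons, List.any_cons, List.isEmpty_cons]
    rw [hstep (max 0 (dswSeverity c)) rest, ih, dswSeverity_eq]
    cases hc : dswDangerCodes.contains c <;>
      cases ha : rest.any (fun c => dswDangerCodes.contains c) <;>
      cases he : rest.isEmpty <;> simp

theorem determine_signal_word_spec_aux (h_codes : List String) :
    determine_signal_word h_codes = determine_signal_word_alt h_codes := by
  unfold determine_signal_word determine_signal_word_alt
  rw [dswDangerLoop_eq, dswFold_eq]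
  by_cases hd : h_codes.any (fun c => dswDangerCodes.contains c) = true
  · rw [if_pos hd, if_pos hd]; rfl
  · rw [if_neg hd, if_neg hd]
    cases hw : dswWarningLoop h_codes with
    | none =>
      by_cases he : h_codes.isEmpty = true
      · rw [if_pos he, if_pos he]; rfl
      · rw [if_neg he, if_neg he]; rfl
    | some r =>
      obtain ⟨hr, hne⟩ := dswWarningLoop_some h_codes r hw
      have he : h_codes.isEmpty = false := by simpa using hne
      rw [he, hr]; rfl

-- ===== VERDICT (by name: the statement is the Claim_ definition above) =====
theorem determine_signal_word_spec : Claim_equal_determine_signal_word := by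
  intro h_codes _
  exact determine_signal_word_spec_aux h_codes
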